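-- pv_equiv track=rewrite | github.com/HafizulHaque/Python-Practice- | test.py | userFunc
-- ===== SOURCE A (Python) =====
-- def userFunc(x):
-- 	i = 0;
-- 	total = 0;
--
-- 	if x%2==0:
-- 		while i<=x :
-- 			total = total+pow(i, 2);
-- 			i+=1;
-- 	else:
-- 		while i<=x :
-- 			total = total + pow(i, 3);
-- 			i+=1;
-- 	return total;
-- ===== SOURCE B (Python) =====
-- def userFunc(x):
--     if x < 0:
--         return 0
--     if x % 2 == 0:
--         return x * (x + 1) * (2 * x + 1) // 6
--     return (x * (x + 1) // 2) ** 2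
-- ===== Notes on version B (the rewrite author's own statement) =====
-- stated objective: faster
-- what changed: Replaced the linear accumulation loop by the classical closed-form polynomial formulas for the sum of squares (even x) and the sum of cubes (odd x), with an early return for negative x where the loop body never runs.
import Mathlib
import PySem

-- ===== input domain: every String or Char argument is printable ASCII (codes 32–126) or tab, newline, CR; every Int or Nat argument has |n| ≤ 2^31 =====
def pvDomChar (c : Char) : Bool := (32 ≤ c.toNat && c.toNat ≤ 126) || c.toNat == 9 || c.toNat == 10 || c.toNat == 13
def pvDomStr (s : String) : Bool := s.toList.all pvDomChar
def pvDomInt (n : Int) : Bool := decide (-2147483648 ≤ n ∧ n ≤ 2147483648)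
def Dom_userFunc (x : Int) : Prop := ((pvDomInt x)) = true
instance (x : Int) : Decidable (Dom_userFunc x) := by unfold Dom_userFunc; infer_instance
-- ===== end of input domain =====

-- B replaces A's O(x) accumulation loops by the closed-form summation formulas (O(1)).

-- ===== PORT A =====
-- the 'while i <= x: total += i**e; i += 1' loop of A (e = 2 in the even branch, 3 in the odd branch)
def userFuncLoop (e : Nat) (x i total : Int) : Int :=
  if i ≤ x then userFuncLoop e x (i + 1) (total + i ^ e) else total
termination_by (x + 1 - i).toNat
decreasing_by omega

def userFunc (x : Int) : Int :=
  if PySem.Int.mod x 2 = 0 then userFuncLoop 2 x 0 0 else userFuncLoop 3 x 0 0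

-- ===== PORT B =====
def userFunc_alt (x : Int) : Int :=
  if x < 0 then 0
  else if PySem.Int.mod x 2 = 0 then PySem.Int.floordiv (x * (x + 1) * (2 * x + 1)) 6
  else (PySem.Int.floordiv (x * (x + 1)) 2) ^ 2

-- ===== PRECONDITION & SPEC =====
def Spec_userFunc (x : Int) (out : Int) : Prop := out = userFunc_alt x
instance (x : Int) (out : Int) : Decidable (Spec_userFunc x out) := by unfold Spec_userFunc; infer_instance

-- ===== CLAIM (what is proved, stated in full; the proofs are below) =====
def Claim_equal_userFunc : Prop := ∀ (x : Int), Dom_userFunc x → Spec_userFunc x (userFunc x)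

-- ===== LEMMAS AND PROOFS =====

theorem userFuncLoop_eq (e : Nat) (n : Nat) :
    ∀ (x i t : Int), (x + 1 - i).toNat = n →
      userFuncLoop e x i t = t + ∑ k ∈ Finset.Icc i x, k ^ e := by
  induction n with
  | zero =>
    intro x i t h
    have hix : x < i := by omega
    rw [userFuncLoop]
    simp [not_le.mpr hix, Finset.Icc_eq_empty_of_lt hix]
  | succ n ih =>
    intro x i t h
    have hix : i ≤ x := by omega
    rw [userFuncLoop]
    simp only [if_pos hix]
    rw [ih x (i + 1) _ (by omega)]
    have hins : Finset.Icc i x = insert i (Finset.Icc (i + 1) x) := by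
      ext k; simp [Finset.mem_Icc]; omega
    rw [hins, Finset.sum_insert (by simp [Finset.mem_Icc])]
    ring

theorem sq_sum_formula : ∀ (x : Int), 0 ≤ x →
    6 * ∑ k ∈ Finset.Icc (0 : Int) x, k ^ 2 = x * (x + 1) * (2 * x + 1) := by
  intro x hx
  induction x, hx using Int.le_induction with
  | base => decide
  | succ m hm ih =>
    have hins : Finset.Icc (0 : Int) (m + 1) = insert (m + 1) (Finset.Icc (0 : Int) m) := by
      ext k; simp [Finset.mem_Icc]; omega
    rw [hins, Finset.sum_insert (by simp [Finset.mem_Icc])]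
    have := ih
    ring_nf
    ring_nf at this
    omega

theorem cube_sum_formula : ∀ (x : Int), 0 ≤ x →
    4 * ∑ k ∈ Finset.Icc (0 : Int) x, k ^ 3 = (x * (x + 1)) ^ 2 := by
  intro x hx
  induction x, hx using Int.le_induction with
  | base => decide
  | succ m hm ih =>
    have hins : Finset.Icc (0 : Int) (m + 1) = insert (m + 1) (Finset.Icc (0 : Int) m) := by
      ext k; simp [Finset.mem_Icc]; omega
    rw [hins, Finset.sum_insert (by simp [Finset.mem_Icc])]
    have := ih
    nlinarith [this]

-- ===== VERDICT (by name: the statement is the Claim_ definition above) =====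
theorem userFunc_spec : Claim_equal_userFunc := by
  intro x _
  unfold Spec_userFunc userFunc userFunc_alt
  by_cases hneg : x < 0
  · have h2 : userFuncLoop 2 x 0 0 = 0 := by rw [userFuncLoop]; simp; omega
    have h3 : userFuncLoop 3 x 0 0 = 0 := by rw [userFuncLoop]; simp; omega
    rw [if_pos hneg]
    split_ifs with hp
    · exact h2
    · exact h3
  · rw [not_lt] at hneg
    simp only [if_neg (not_lt.mpr hneg)]
    split_ifs with hpar
    · -- even branch: sum of squares
      rw [userFuncLoop_eq 2 (x + 1 - 0).toNat x 0 0 rfl]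
      have h6 := sq_sum_formula x hneg
      rw [PySem.Int.floordiv_eq_ediv_of_pos (by norm_num), ← h6]
      rw [Int.mul_ediv_cancel_left _ (by norm_num)]
      ring
    · -- odd branch: sum of cubes
      rw [userFuncLoop_eq 3 (x + 1 - 0).toNat x 0 0 rfl]
      have h4 := cube_sum_formula x hneg
      have hdvd : (2 : Int) ∣ x * (x + 1) := (Int.even_mul_succ_self x).two_dvd
      rw [PySem.Int.floordiv_eq_ediv_of_pos (by norm_num)]
      obtain ⟨t, ht⟩ := hdvd
      rw [ht, Int.mul_ediv_cancel_left _ (by norm_num)]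
      have : 4 * (0 + ∑ k ∈ Finset.Icc (0 : Int) x, k ^ 3) = 4 * t ^ 2 := by
        rw [zero_add, h4, ht]; ring
      have := mul_left_cancel₀ (a := (4 : Int)) (by norm_num) this
      omega
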